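-- pv_equiv track=rewrite | github.com/zrr1999/loom | tests/e2e/test_cli.py | _parse_task_blocks
-- ===== SOURCE A (Python) =====
-- def _parse_task_blocks(output: str) -> list[dict[str, str]]:
--     blocks: list[dict[str, str]] = []
--     current: dict[str, str] | None = None
--     for line in output.splitlines():
--         stripped = line.strip()
--         if stripped.startswith("TASK "):
--             if current is not None:
--                 blocks.append(current)
--             current = {"id": stripped.split()[-1]}
--             continue
--         if current is None or not line.startswith("    "):
--             continue
--         if ":" not in stripped:
--             continue
--         key, value = stripped.split(":", 1)
--         current[key.strip()] = value.strip()
--     if current is not None: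
--         blocks.append(current)
--     return blocks
-- ===== SOURCE B (Python) =====
-- def _parse_group(header, body):
--     d = {"id": header.strip().split()[-1]}
--     for line in body:
--         s = line.strip()
--         if line.startswith("    ") and ":" in s:
--             k, v = s.split(":", 1)
--             d[k.strip()] = v.strip()
--     return d
--
--
-- def _parse_task_blocks(output):
--     lines = output.splitlines()
--     # first pass: cut into (header, body) groups at lines whose stripped form
--     # starts with "TASK "; lines before the first marker are dropped
--     i = 0
--     while i < len(lines) and not lines[i].strip().startswith("TASK "):
--         i += 1
--     groups = []
--     while i < len(lines):
--         j = i + 1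
--         while j < len(lines) and not lines[j].strip().startswith("TASK "):
--             j += 1
--         groups.append((lines[i], lines[i + 1:j]))
--         i = j
--     # second pass: parse each group independently
--     return [_parse_group(h, b) for h, b in groups]
-- ===== Notes on version B (the rewrite author's own statement) =====
-- stated objective: simpler
-- what changed: Replaces A's single stateful fold carrying an optional in-progress dict (with deferred flushing at the next marker and after the loop) by two independent passes: cut the lines into (header, body) groups at TASK markers, then parse each group on its own.
import Mathlib
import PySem

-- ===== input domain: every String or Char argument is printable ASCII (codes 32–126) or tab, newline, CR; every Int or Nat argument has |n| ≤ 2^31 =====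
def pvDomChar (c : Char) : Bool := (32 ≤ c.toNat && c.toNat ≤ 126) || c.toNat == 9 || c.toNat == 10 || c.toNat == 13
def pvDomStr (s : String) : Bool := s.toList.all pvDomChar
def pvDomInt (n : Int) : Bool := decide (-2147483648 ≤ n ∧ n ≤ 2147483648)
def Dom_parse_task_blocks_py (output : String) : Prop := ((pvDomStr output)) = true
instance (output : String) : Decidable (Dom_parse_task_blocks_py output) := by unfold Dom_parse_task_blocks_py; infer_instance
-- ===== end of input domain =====

-- B re-decomposes A's single stateful fold into two passes (group the lines at TASK
-- markers, then parse each group independently); objective: simpler, same cost.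

-- ===== PORT A =====
-- one loop iteration of A's for-loop over splitlines, state = (blocks, current)
def pvStepA (st : List (PySem.Dict String String) × Option (PySem.Dict String String))
    (line : String) : List (PySem.Dict String String) × Option (PySem.Dict String String) :=
  let stripped := PySem.Str.strip line
  if PySem.Str.startswith stripped "TASK " then
    ((match st.2 with | some c => st.1 ++ [c] | none => st.1),
     -- stripped.split()[-1]: stripped starts with "TASK " and has no trailing
     -- whitespace, so split() is nonempty and the .getD "" default is unreachable
     some (PySem.Dict.ofList [("id", (PySem.List.pyGet? (PySem.Str.split₀ stripped) (-1)).getD "")]))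
  else
    match st.2 with
    | none => st
    | some c =>
      if !PySem.Str.startswith line "    " then st
      else if !PySem.Str.isIn ":" stripped then st
      else
        -- ":" ∈ stripped, so split(":", 1) yields exactly two pieces; other cases unreachable
        match PySem.Str.splitMax? stripped ":" 1 with
        | some (k :: v :: _) => (st.1, some (c.insert (PySem.Str.strip k) (PySem.Str.strip v)))
        | _ => st

def parse_task_blocks_py (output : String) : List (List (String × String)) :=
  let st := (PySem.Str.splitlines output).foldl pvStepA ([], none)
  List.map PySem.Dict.items (match st.2 with | some c => st.1 ++ [c] | none => st.1)

-- ===== PORT B =====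
def pvIsTask (line : String) : Bool := PySem.Str.startswith (PySem.Str.strip line) "TASK "

-- B's first pass: cut the lines (already positioned at a TASK marker) into groups
def pvGroupLines : List String → List (String × List String)
  | [] => []
  | l :: rest =>
    (l, rest.takeWhile (fun x => !pvIsTask x)) ::
      pvGroupLines (rest.dropWhile (fun x => !pvIsTask x))
termination_by l => l.length
decreasing_by
  calc (rest.dropWhile (fun x => !pvIsTask x)).length
      ≤ rest.length := List.length_dropWhile_le _ _
    _ < (l :: rest).length := by simp

-- B's per-line field update inside _parse_group
def pvFieldStep (d : PySem.Dict String String) (line : String) : PySem.Dict String String :=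
  let s := PySem.Str.strip line
  if PySem.Str.startswith line "    " && PySem.Str.isIn ":" s then
    match PySem.Str.splitMax? s ":" 1 with
    | some (k :: v :: _) => d.insert (PySem.Str.strip k) (PySem.Str.strip v)
    | _ => d
  else d

def pvParseGroupD (header : String) (body : List String) : PySem.Dict String String :=
  body.foldl pvFieldStep
    (PySem.Dict.ofList
      [("id", (PySem.List.pyGet? (PySem.Str.split₀ (PySem.Str.strip header)) (-1)).getD "")])

def parse_task_blocks_py_alt (output : String) : List (List (String × String)) :=
  let lines := PySem.Str.splitlines output
  ((pvGroupLines (lines.dropWhile (fun l => !pvIsTask l))).map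
    (fun g => pvParseGroupD g.1 g.2)).map PySem.Dict.items

-- ===== PRECONDITION & SPEC =====
def Spec_parse_task_blocks_py (output : String) (out : List (List (String × String))) : Prop := out = parse_task_blocks_py_alt output
instance (output : String) (out : List (List (String × String))) : Decidable (Spec_parse_task_blocks_py output out) := by unfold Spec_parse_task_blocks_py; infer_instance

-- ===== CLAIM (what is proved, stated in full; the proofs are below) =====
def Claim_equal_parse_task_blocks_py : Prop := ∀ (output : String), Dom_parse_task_blocks_py output → Spec_parse_task_blocks_py output (parse_task_blocks_py output)

-- ===== LEMMAS AND PROOFS =====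

def pvFinalize (st : List (PySem.Dict String String) × Option (PySem.Dict String String)) :
    List (PySem.Dict String String) :=
  match st.2 with | some c => st.1 ++ [c] | none => st.1

theorem pvGroupLines_nil : pvGroupLines [] = [] := by
  rw [pvGroupLines]

theorem pvGroupLines_cons (l : String) (rest : List String) :
    pvGroupLines (l :: rest) =
      (l, rest.takeWhile (fun x => !pvIsTask x)) ::
        pvGroupLines (rest.dropWhile (fun x => !pvIsTask x)) := by
  rw [pvGroupLines]

theorem pvTASK : "TASK ".toList = ['T','A','S','K',' '] := rfl
theorem pvSP4 : "    ".toList = [' ',' ',' ',' '] := rfl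
theorem pvCOL : ":".toList = [':'] := rfl

theorem pvStepA_some (bs : List (PySem.Dict String String)) (c : PySem.Dict String String)
    (l : String) :
    pvStepA (bs, some c) l =
      if pvIsTask l then
        (bs ++ [c],
         some (PySem.Dict.ofList
           [("id", (PySem.List.pyGet? (PySem.Str.split₀ (PySem.Str.strip l)) (-1)).getD "")]))
      else (bs, some (pvFieldStep c l)) := by
  unfold pvStepA pvFieldStep pvIsTask
  simp only [PySem.Str.startswith, PySem.Str.isIn, PySem.Str.toList_strip, pvTASK, pvSP4, pvCOL]
  by_cases h1 : PySem.Chars.startswith (PySem.Chars.strip l.toList) ['T','A','S','K',' '] = true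
  · simp [h1]
  · by_cases h2 : PySem.Chars.startswith l.toList [' ',' ',' ',' '] = true
    · by_cases h3 : PySem.Chars.isIn [':'] (PySem.Chars.strip l.toList) = true
      · simp only [Bool.not_eq_true] at h1
        simp only [h1, h2, h3]
        simp only [Bool.false_eq_true, if_neg, not_false_iff]
        cases PySem.Str.splitMax? (PySem.Str.strip l) ":" 1 with
        | none => rfl
        | some p => cases p with
          | nil => rfl
          | cons k t => cases t with
            | nil => rfl
            | cons v t' => rfl
      · simp only [Bool.not_eq_true] at h1 h3
        simp [h1, h2, h3]
    · simp only [Bool.not_eq_true] at h1 h2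
      simp [h1, h2]

theorem pvStepA_none (bs : List (PySem.Dict String String)) (l : String) (h : pvIsTask l = false) :
    pvStepA (bs, none) l = (bs, none) := by
  simp only [pvIsTask, PySem.Str.startswith, PySem.Str.toList_strip, pvTASK] at h
  unfold pvStepA
  simp only [PySem.Str.startswith, PySem.Str.toList_strip, pvTASK]
  simp [h]

theorem pvStepA_none_task (bs : List (PySem.Dict String String)) (l : String)
    (h : pvIsTask l = true) :
    pvStepA (bs, none) l =
      (bs, some (PySem.Dict.ofList
        [("id", (PySem.List.pyGet? (PySem.Str.split₀ (PySem.Str.strip l)) (-1)).getD "")])) := by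
  simp only [pvIsTask, PySem.Str.startswith, PySem.Str.toList_strip, pvTASK] at h
  unfold pvStepA
  simp only [PySem.Str.startswith, PySem.Str.toList_strip, pvTASK]
  simp [h]

theorem pvLoop_some (lines : List String) (bs : List (PySem.Dict String String))
    (c : PySem.Dict String String) :
    pvFinalize (lines.foldl pvStepA (bs, some c)) =
      bs ++ [(lines.takeWhile (fun x => !pvIsTask x)).foldl pvFieldStep c] ++
        (pvGroupLines (lines.dropWhile (fun x => !pvIsTask x))).map
          (fun g => pvParseGroupD g.1 g.2) := by
  induction lines generalizing bs c with
  | nil => simp [pvFinalize, pvGroupLines_nil]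
  | cons l rest ih =>
    by_cases h : pvIsTask l = true
    · simp only [List.foldl_cons, pvStepA_some, h, if_pos]
      rw [ih]
      simp [h, pvGroupLines_cons, pvParseGroupD]
    · simp only [Bool.not_eq_true] at h
      simp only [List.foldl_cons, pvStepA_some, h, Bool.false_eq_true, if_neg, not_false_iff]
      rw [ih]
      simp [h]

theorem pvLoop_none (lines : List String) (bs : List (PySem.Dict String String)) :
    pvFinalize (lines.foldl pvStepA (bs, none)) =
      bs ++ (pvGroupLines (lines.dropWhile (fun l => !pvIsTask l))).map
          (fun g => pvParseGroupD g.1 g.2) := by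
  induction lines generalizing bs with
  | nil => simp [pvFinalize, pvGroupLines_nil]
  | cons l rest ih =>
    by_cases h : pvIsTask l = true
    · simp only [List.foldl_cons, pvStepA_none_task _ _ h]
      rw [pvLoop_some]
      simp [h, pvGroupLines_cons, pvParseGroupD]
    · simp only [Bool.not_eq_true] at h
      simp only [List.foldl_cons, pvStepA_none _ _ h]
      rw [ih]
      simp [h]

-- ===== VERDICT (by name: the statement is the Claim_ definition above) =====
theorem parse_task_blocks_py_spec : Claim_equal_parse_task_blocks_py := by
  intro output _
  unfold Spec_parse_task_blocks_py
  show List.map PySem.Dict.items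
      (pvFinalize ((PySem.Str.splitlines output).foldl pvStepA ([], none))) =
    parse_task_blocks_py_alt output
  rw [pvLoop_none]
  unfold parse_task_blocks_py_alt
  simp
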